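-- pv_equiv track=rewrite | github.com/MacShi/burpExtender | Unauth(cookie).py | checkSuffix
-- ===== SOURCE A (Python) =====
-- def checkSuffix(url):
--     '''
--     根据url判断是否访问图片等资源，当访问资源是图片、js时返回True，不是的话返回False
--     :param url: url
--     :return:
--     '''
--     suffixBlack = [
--         ".js", ".jsx", ".coffee", ".ts",
--         ".css", ".less", ".scss", ".sass",
--         ".ico", ".jpg", ".png", ".gif", ".bmp", ".svg",
--         ".ttf", ".eot", ".woff", ".woff2",
--         ".ejs", ".jade", ".vue"
--     ]
--     for suffix in suffixBlack:
--         if url.endswith(suffix):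
--             return True
--     return False
-- ===== SOURCE B (Python) =====
-- _EXTS = {
--     "js", "jsx", "coffee", "ts",
--     "css", "less", "scss", "sass",
--     "ico", "jpg", "png", "gif", "bmp", "svg",
--     "ttf", "eot", "woff", "woff2",
--     "ejs", "jade", "vue",
-- }
--
--
-- def checkSuffix(url):
--     # single forward pass: track the extension text after the last dot seen so far
--     ext = None
--     for c in url:
--         if c == '.':
--             ext = ''
--         elif ext is not None:
--             ext += c
--     return ext in _EXTS
-- ===== Notes on version B (the rewrite author's own statement) =====
-- stated objective: alternative
-- what changed: A scans the url once per blacklist entry with 21 endswith tests; B makes one forward pass with an accumulator holding the text after the last dot seen so far, then does a single set lookup of that bare extension (no dots stored).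
import Mathlib
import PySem

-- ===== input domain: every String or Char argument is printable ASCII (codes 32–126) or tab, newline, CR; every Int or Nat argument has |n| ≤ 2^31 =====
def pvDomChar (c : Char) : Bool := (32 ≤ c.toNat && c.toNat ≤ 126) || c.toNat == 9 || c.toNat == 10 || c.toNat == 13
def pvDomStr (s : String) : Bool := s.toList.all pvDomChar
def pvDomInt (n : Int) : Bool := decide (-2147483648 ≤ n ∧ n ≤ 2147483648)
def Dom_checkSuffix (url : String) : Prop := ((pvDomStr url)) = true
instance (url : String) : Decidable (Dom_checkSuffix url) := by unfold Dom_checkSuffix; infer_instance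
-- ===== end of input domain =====

-- B replaces A's 21 endswith scans by one forward pass tracking the text after
-- the last dot, followed by a single set lookup of the bare extension.

-- ===== PORT A =====
def suffixBlack : List String :=
  [".js", ".jsx", ".coffee", ".ts",
   ".css", ".less", ".scss", ".sass",
   ".ico", ".jpg", ".png", ".gif", ".bmp", ".svg",
   ".ttf", ".eot", ".woff", ".woff2",
   ".ejs", ".jade", ".vue"]

-- the 'for suffix in suffixBlack: if url.endswith(suffix): return True' loop
def checkLoop (url : String) : List String → Bool
  | [] => false
  | s :: rest => if PySem.Str.endswith url s then true else checkLoop url rest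

def checkSuffix (url : String) : Bool := checkLoop url suffixBlack

-- ===== PORT B =====
-- the set of bare extensions (no leading dots), a PySem set
def extSet : PySem.Set String :=
  PySem.Set.ofList
    ["js", "jsx", "coffee", "ts",
     "css", "less", "scss", "sass",
     "ico", "jpg", "png", "gif", "bmp", "svg",
     "ttf", "eot", "woff", "woff2",
     "ejs", "jade", "vue"]

-- Source B's forward for-loop: ext is None until a dot is seen; a dot resets it to '',
-- any other character is appended when ext is not None.
def lastExt : List Char → Option (List Char) → Option (List Char)
  | [], acc => acc
  | c :: rest, acc =>
      if c = '.' then lastExt rest (some [])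
      else lastExt rest (acc.map (fun t => t ++ [c]))

def checkSuffix_alt (url : String) : Bool :=
  match lastExt url.toList none with
  | none => false                                     -- ext is still None: no dot seen
  | some e => extSet.contains (String.ofList e)       -- ext in _EXTS

-- ===== PRECONDITION & SPEC =====
def Spec_checkSuffix (url : String) (out : Bool) : Prop := out = checkSuffix_alt url
instance (url : String) (out : Bool) : Decidable (Spec_checkSuffix url out) := by unfold Spec_checkSuffix; infer_instance

-- ===== CLAIM (what is proved, stated in full; the proofs are below) =====
def Claim_equal_checkSuffix : Prop := ∀ (url : String), Dom_checkSuffix url → Spec_checkSuffix url (checkSuffix url)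

-- ===== LEMMAS AND PROOFS =====

-- the A loop is an 'any' over the suffix list
theorem checkLoop_eq_any (url : String) (L : List String) :
    checkLoop url L = L.any (fun s => PySem.Str.endswith url s) := by
  induction L with
  | nil => rfl
  | cons s rest ih =>
    rw [List.any_cons, ← ih, checkLoop]
    cases h : PySem.Str.endswith url s
    · simp
    · simp

-- characterization of the forward pass: the result is the dot-free segment after the
-- last dot of cs, or (when cs has no dot) the accumulator extended by all of cs
theorem lastExt_spec (cs : List Char) : ∀ (acc : Option (List Char)) (e : List Char),
    lastExt cs acc = some e ↔
      (∃ p, cs = p ++ '.' :: e ∧ '.' ∉ e) ∨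
      ('.' ∉ cs ∧ ∃ e0, acc = some e0 ∧ e = e0 ++ cs) := by
  induction cs with
  | nil =>
    intro acc e
    simp [lastExt]
  | cons c rest ih =>
    intro acc e
    by_cases h : c = '.'
    · subst h
      have hstep : lastExt ('.' :: rest) acc = lastExt rest (some []) := by
        simp [lastExt]
      rw [hstep, ih]
      constructor
      · rintro (⟨p, hr, he⟩ | ⟨hnd, e0, he0, hee⟩)
        · exact Or.inl ⟨'.' :: p, by simp [hr], he⟩
        · injection he0 with he0
          subst he0
          simp at hee
          subst hee
          exact Or.inl ⟨[], by simp, hnd⟩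
      · rintro (⟨p, hr, he⟩ | ⟨hnd, _⟩)
        · cases p with
          | nil =>
            simp at hr
            subst hr
            exact Or.inr ⟨he, [], rfl, by simp⟩
          | cons x p' =>
            simp at hr
            exact Or.inl ⟨p', hr.2, he⟩
        · simp at hnd
    · have hstep : lastExt (c :: rest) acc = lastExt rest (acc.map (fun t => t ++ [c])) := by
        simp [lastExt, h]
      rw [hstep, ih]
      constructor
      · rintro (⟨p, hr, he⟩ | ⟨hnd, e0, he0, hee⟩)
        · exact Or.inl ⟨c :: p, by simp [hr], he⟩
        · cases acc with
          | none => simp at he0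
          | some t =>
            simp at he0
            subst he0
            refine Or.inr ⟨?_, t, rfl, by simp [hee]⟩
            simp only [List.mem_cons]
            push Not
            exact ⟨fun hc => h hc.symm, hnd⟩
      · rintro (⟨p, hr, he⟩ | ⟨hnd, e0, he0, hee⟩)
        · cases p with
          | nil =>
            simp at hr
            exact absurd hr.1 h
          | cons x p' =>
            simp at hr
            exact Or.inl ⟨p', hr.2, he⟩
        · simp only [List.mem_cons] at hnd
          push Not at hnd
          subst he0
          exact Or.inr ⟨hnd.2, e0 ++ [c], by simp, by simp [hee]⟩

-- for a suffix string of the shape '.' :: t with t dot-free,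
-- url.endswith(s) iff the forward pass yields exactly t = s.toList.tail
theorem endswith_iff_lastExt (url s : String)
    (h1 : s.toList.head? = some '.') (h2 : '.' ∉ s.toList.tail) :
    PySem.Str.endswith url s = decide (lastExt url.toList none = some s.toList.tail) := by
  obtain ⟨t, ht⟩ : ∃ t, s.toList = '.' :: t := by
    cases hs : s.toList with
    | nil => rw [hs] at h1; simp at h1
    | cons c tl => rw [hs] at h1; simp at h1; exact ⟨tl, by rw [h1]⟩
  rw [ht] at h2 ⊢; simp only [List.tail_cons] at h2 ⊢
  have key : PySem.Str.endswith url s = true ↔ lastExt url.toList none = some t := by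
    rw [PySem.Str.endswith_eq, PySem.Chars.endswith_iff, ht, lastExt_spec]
    constructor
    · rintro ⟨u, hu⟩
      exact Or.inl ⟨u, hu.symm, h2⟩
    · rintro (⟨p, hr, _⟩ | ⟨_, e0, he0, _⟩)
      · exact ⟨p, hr.symm⟩
      · simp at he0
  cases hE : PySem.Str.endswith url s with
  | false =>
    symm
    rw [decide_eq_false_iff_not]
    intro hscan
    have hc := key.mpr hscan
    rw [hE] at hc
    exact Bool.false_ne_true hc
  | true =>
    symm
    rw [decide_eq_true_eq]
    exact key.mp hE

-- String.ofList vs toList under ==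
theorem ofList_beq (e : List Char) (s : String) : (String.ofList e == s) = decide (e = s.toList) := by
  rw [Bool.beq_eq_decide_eq]
  simp only [decide_eq_decide]
  constructor
  · rintro rfl; simp
  · intro h; rw [h]; simp [String.ofList]

-- ===== VERDICT (by name: the statement is the Claim_ definition above) =====
theorem checkSuffix_spec : Claim_equal_checkSuffix := by
  intro url _
  unfold Spec_checkSuffix checkSuffix checkSuffix_alt
  rw [checkLoop_eq_any]
  have hshape : ∀ s ∈ suffixBlack, s.toList.head? = some '.' ∧ '.' ∉ s.toList.tail := by decide
  have hall : ∀ s ∈ suffixBlack,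
      PySem.Str.endswith url s = decide (lastExt url.toList none = some s.toList.tail) := by
    intro s hs
    exact endswith_iff_lastExt url s (hshape s hs).1 (hshape s hs).2
  rw [PySem.List.any_congr_mem hall]
  cases hscan : lastExt url.toList none with
  | none => simp [suffixBlack]
  | some e =>
    change _ = extSet.contains (String.ofList e)
    rw [show PySem.Set.contains extSet (String.ofList e)
          = List.contains (extSet : List String) (String.ofList e) from rfl,
        List.contains_eq_any_beq]
    have hB : ∀ s ∈ (extSet : List String),
        (String.ofList e == s) = decide (e = s.toList) := fun s _ => ofList_beq e s
    rw [PySem.List.any_congr_mem hB]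
    simp only [Option.some.injEq]
    rfl
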